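-- pv_equiv track=rewrite | github.com/Zeeeepa/codebase-analytics | backend/advanced_analysis.py | calculate_call_depth
-- ===== SOURCE A (Python) =====
-- from typing import Dict, List, Any, Optional, Set, Tuple, Union
--
-- def calculate_call_depth(call_graph: Dict[str, List[str]]) -> int:
--     """Calculate the maximum call depth."""
--     def get_depth(func, visited):
--         if func in visited:
--             return 0  # Avoid infinite recursion
--
--         visited.add(func)
--         max_depth = 0
--
--         for called_func in call_graph.get(func, []):
--             depth = get_depth(called_func, visited.copy())
--             max_depth = max(max_depth, depth)
--
--         return max_depth + 1
--
--     max_depth = 0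
--     for func in call_graph:
--         depth = get_depth(func, set())
--         max_depth = max(max_depth, depth)
--
--     return max_depth
-- ===== SOURCE B (Python) =====
-- def calculate_call_depth(call_graph):
--     """Calculate the maximum call depth."""
--     depth = 0
--     frontier = [(f, frozenset([f])) for f in call_graph]
--     while frontier:
--         depth += 1
--         frontier = [(c, seen | {c})
--                     for f, seen in frontier
--                     for c in call_graph.get(f, [])
--                     if c not in seen]
--     return depth
-- ===== Notes on version B (the rewrite author's own statement) =====
-- stated objective: alternative
-- what changed: Replaces the per-start recursive get_depth (which returns 1 + max over children and folds per-node maxima) by a breadth-first level expansion: a frontier of (node, path-set) states is expanded one level per iteration and the answer is the number of iterations until the frontier empties, so no depth values or max operations are kept at all.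
import Mathlib
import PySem

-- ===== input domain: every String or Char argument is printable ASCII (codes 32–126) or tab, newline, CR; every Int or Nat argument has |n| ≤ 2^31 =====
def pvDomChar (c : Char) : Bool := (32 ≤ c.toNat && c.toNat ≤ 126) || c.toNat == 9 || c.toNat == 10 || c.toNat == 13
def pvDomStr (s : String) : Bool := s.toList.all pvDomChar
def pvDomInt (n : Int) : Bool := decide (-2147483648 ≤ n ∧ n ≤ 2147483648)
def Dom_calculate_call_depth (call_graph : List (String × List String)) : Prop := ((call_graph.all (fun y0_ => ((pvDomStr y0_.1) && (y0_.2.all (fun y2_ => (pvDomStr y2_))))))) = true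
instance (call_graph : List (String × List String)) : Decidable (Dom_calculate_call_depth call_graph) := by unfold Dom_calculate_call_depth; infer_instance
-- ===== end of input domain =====

-- B replaces A's per-start recursive get_depth (1 + max over children, folding per-node maxima)
-- by a breadth-first level expansion of a frontier of (node, path-set) states, returning the
-- number of levels until the frontier empties (objective: alternative).

-- ===== PORT A =====
-- termination measure machinery, shared by both ports: how many elements of a list are not yet in a set
def pvLeftIn (l : List String) (w : PySem.Set String) : Nat :=
  (l.filter (fun u => !(PySem.Set.contains w u))).length

-- a filtered list shrinks strictly when the predicate newly fails on a member it used to accept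
theorem pvFilterLenLt {l : List String} {p q : String → Bool} (a : String) (ha : a ∈ l)
    (hp : p a = true) (hq : q a = false) (himp : ∀ x, q x = true → p x = true) :
    (l.filter q).length < (l.filter p).length := by
  have hsub : ∀ (ys : List String), (ys.filter q).length ≤ (ys.filter p).length := by
    intro ys
    induction ys with
    | nil => simp
    | cons y ys ihy =>
      by_cases hqy : q y = true
      · simp [hqy, himp y hqy]; omega
      · simp only [Bool.not_eq_true] at hqy
        cases hpy : p y <;> simp [hqy, hpy] <;> omega
  induction l with
  | nil => cases ha
  | cons x xs ih =>
    rcases List.mem_cons.mp ha with rfl | hmem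
    · have := hsub xs
      simp [hp, hq]
      omega
    · have h2 := ih hmem
      by_cases hqx : q x = true
      · simp [hqx, himp x hqx]; omega
      · simp only [Bool.not_eq_true] at hqx
        cases hpx : p x <;> simp [hqx, hpx] <;> omega

theorem pvLeftIn_lt (l : List String) (a : String) (w : PySem.Set String)
    (ha : a ∈ l) (hw : PySem.Set.contains w a = false) :
    pvLeftIn l (PySem.Set.add w a) < pvLeftIn l w := by
  have hwa : a ∉ w := by simp at hw; exact hw
  unfold pvLeftIn
  apply pvFilterLenLt a ha
  · simpa using hwa
  · have : a ∈ PySem.Set.add w a := (PySem.Set.mem_add w a a).mpr (Or.inr rfl)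
    simpa using this
  · intro x hx
    simp only [Bool.not_eq_true'] at *
    simp only [PySem.Set.contains_eq_listContains, List.contains_eq_mem,
      decide_eq_false_iff_not] at *
    intro hmem
    exact hx ((PySem.Set.mem_add w a x).mpr (Or.inl hmem))

theorem pvGetD_ne_nil_mem_keys (cg : List (String × List String)) (f : String)
    (h : PySem.Dict.getD (PySem.Dict.mk cg) f [] ≠ ([] : List String)) :
    f ∈ (PySem.Dict.mk cg).keys := by
  by_contra hf
  rw [PySem.Dict.getD_eq_get?_getD, (PySem.Dict.get?_eq_none_iff_not_mem_keys _ _).mpr hf] at h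
  simp at h

-- A's measure: dict keys not yet visited
def pvKeysLeft (call_graph : List (String × List String)) (visited : PySem.Set String) : Nat :=
  pvLeftIn ((PySem.Dict.mk call_graph).keys) visited

theorem pvKeysLeft_lt (cg : List (String × List String)) (f : String) (v : PySem.Set String)
    (hf : f ∈ (PySem.Dict.mk cg).keys) (hv : PySem.Set.contains v f = false) :
    pvKeysLeft cg (PySem.Set.add v f) < pvKeysLeft cg v :=
  pvLeftIn_lt _ f v hf hv

-- transliteration of A's inner get_depth(func, visited)
def pvGetDepthA (cg : List (String × List String)) (f : String) (v : PySem.Set String) : Int :=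
  if hv : PySem.Set.contains v f then 0
  else
    ((PySem.Dict.getD (PySem.Dict.mk cg) f []).attach.foldl
      (fun md c => max md (pvGetDepthA cg c.1 (PySem.Set.add v f))) 0) + 1
termination_by pvKeysLeft cg v
decreasing_by
  exact pvKeysLeft_lt cg f v
    (pvGetD_ne_nil_mem_keys cg f (List.ne_nil_of_mem c.2))
    (by simpa using hv)

def calculate_call_depth (call_graph : List (String × List String)) : Int :=
  ((PySem.Dict.mk call_graph).keys).foldl
    (fun md f => max md (pvGetDepthA call_graph f PySem.Set.empty)) 0

-- ===== PORT B =====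
-- B's measure: dict values (possible frontier heads after level 1) not yet in a frame's path-set
def pvVals (cg : List (String × List String)) : List String := cg.flatMap (fun p => p.2)

theorem pvGetD_subset_vals (cg : List (String × List String)) (f x : String)
    (hx : x ∈ PySem.Dict.getD (PySem.Dict.mk cg) f []) : x ∈ pvVals cg := by
  induction cg with
  | nil =>
    rw [PySem.Dict.getD_eq_get?_getD, PySem.Dict.get?] at hx
    simp at hx
  | cons p rest ih =>
    rw [PySem.Dict.getD_eq_get?_getD, PySem.Dict.get?_mk_cons] at hx
    by_cases hk : (p.1 == f) = true
    · rw [if_pos hk] at hx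
      simp only [Option.getD_some] at hx
      exact List.mem_flatMap.mpr ⟨p, List.mem_cons_self, hx⟩
    · rw [if_neg hk, ← PySem.Dict.getD_eq_get?_getD] at hx
      have := ih hx
      simp only [pvVals, List.flatMap_cons] at *
      exact List.mem_append_right _ this

-- one frame's children: the inner 'for c in call_graph.get(f, []) if c not in seen' comprehension
-- ('seen | {c}' on a set not containing c is exactly PySem.Set.add seen c)
def pvNext (cg : List (String × List String)) (fr : String × PySem.Set String) :
    List (String × PySem.Set String) :=
  (PySem.Dict.getD (PySem.Dict.mk cg) fr.1 []).filterMap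
    (fun c => if PySem.Set.contains fr.2 c then none else some (c, PySem.Set.add fr.2 c))

def pvFrMeas (cg : List (String × List String)) (fr : List (String × PySem.Set String)) : Nat :=
  fr.foldr (fun x m => max (pvLeftIn (pvVals cg) x.2 + 1) m) 0

theorem pvFrMeas_mem_le (cg : List (String × List String))
    (fr : List (String × PySem.Set String)) (x : String × PySem.Set String) (hx : x ∈ fr) :
    pvLeftIn (pvVals cg) x.2 + 1 ≤ pvFrMeas cg fr := by
  induction fr with
  | nil => cases hx
  | cons y t ih =>
    rcases List.mem_cons.mp hx with rfl | hm
    · simp [pvFrMeas]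
    · have := ih hm
      simp only [pvFrMeas, List.foldr_cons] at *
      omega

theorem pvFrMeas_le (cg : List (String × List String))
    (fr : List (String × PySem.Set String)) (k : Nat)
    (h : ∀ x ∈ fr, pvLeftIn (pvVals cg) x.2 + 1 ≤ k) : pvFrMeas cg fr ≤ k := by
  induction fr with
  | nil => simp [pvFrMeas]
  | cons y t ih =>
    have h1 := h y List.mem_cons_self
    have h2 := ih (fun x hx => h x (List.mem_cons_of_mem _ hx))
    simp only [pvFrMeas, List.foldr_cons] at *
    omega

theorem pvNext_meas_lt (cg : List (String × List String)) (p x : String × PySem.Set String)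
    (hx : x ∈ pvNext cg p) : pvLeftIn (pvVals cg) x.2 < pvLeftIn (pvVals cg) p.2 := by
  obtain ⟨c, hc, hcx⟩ := List.mem_filterMap.mp hx
  by_cases hw : PySem.Set.contains p.2 c = true
  · rw [if_pos hw] at hcx; cases hcx
  · have hw' : PySem.Set.contains p.2 c = false := by simpa using hw
    rw [if_neg hw] at hcx
    cases hcx
    exact pvLeftIn_lt _ c p.2 (pvGetD_subset_vals cg p.1 c hc) hw'

theorem pvFrMeas_next_lt (cg : List (String × List String))
    (fr : List (String × PySem.Set String)) (hne : ¬ fr = []) :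
    pvFrMeas cg (fr.flatMap (pvNext cg)) < pvFrMeas cg fr := by
  obtain ⟨p, t, rfl⟩ := List.exists_cons_of_ne_nil hne
  have hpos : 1 ≤ pvFrMeas cg (p :: t) := by
    have := pvFrMeas_mem_le cg (p :: t) p List.mem_cons_self
    omega
  have hle : pvFrMeas cg ((p :: t).flatMap (pvNext cg)) ≤ pvFrMeas cg (p :: t) - 1 := by
    apply pvFrMeas_le
    intro x hx
    obtain ⟨q, hq, hxq⟩ := List.mem_flatMap.mp hx
    have h1 := pvNext_meas_lt cg q x hxq
    have h2 := pvFrMeas_mem_le cg (p :: t) q hq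
    omega
  omega

-- transliteration of B's while-loop: expand the whole frontier one level per iteration
def pvLevels (cg : List (String × List String))
    (frontier : List (String × PySem.Set String)) (depth : Int) : Int :=
  if h : frontier = [] then depth
  else pvLevels cg (frontier.flatMap (pvNext cg)) (depth + 1)
termination_by pvFrMeas cg frontier
decreasing_by simpa using pvFrMeas_next_lt cg frontier h

def calculate_call_depth_alt (call_graph : List (String × List String)) : Int :=
  pvLevels call_graph
    (((PySem.Dict.mk call_graph).keys).map (fun f => (f, PySem.Set.ofList [f]))) 0

-- ===== PRECONDITION & SPEC =====
def Spec_calculate_call_depth (call_graph : List (String × List String)) (out : Int) : Prop := out = calculate_call_depth_alt call_graph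
instance (call_graph : List (String × List String)) (out : Int) : Decidable (Spec_calculate_call_depth call_graph out) := by unfold Spec_calculate_call_depth; infer_instance

-- ===== CLAIM (what is proved, stated in full; the proofs are below) =====
def Claim_equal_calculate_call_depth : Prop := ∀ (call_graph : List (String × List String)), Dom_calculate_call_depth call_graph → Spec_calculate_call_depth call_graph (calculate_call_depth call_graph)

-- ===== LEMMAS AND PROOFS =====

-- remaining depth of a frame (f, w) with f already in its path-set w
def pvReach (cg : List (String × List String)) (f : String) (w : PySem.Set String) : Int :=
  ((PySem.Dict.getD (PySem.Dict.mk cg) f []).attach.foldl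
    (fun m c =>
      max m (if hc : PySem.Set.contains w c.1 then 0 else pvReach cg c.1 (PySem.Set.add w c.1))) 0) + 1
termination_by pvLeftIn (pvVals cg) w
decreasing_by
  exact pvLeftIn_lt _ c.1 w (pvGetD_subset_vals cg f c.1 c.2) (by simpa using hc)

theorem pvGetDepthA_mem (cg : List (String × List String)) (f : String) (v : PySem.Set String)
    (h : PySem.Set.contains v f = true) : pvGetDepthA cg f v = 0 := by
  rw [pvGetDepthA, dif_pos h]

theorem pvGetDepthA_not_mem (cg : List (String × List String)) (f : String) (v : PySem.Set String)
    (h : PySem.Set.contains v f = false) :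
    pvGetDepthA cg f v =
      ((PySem.Dict.getD (PySem.Dict.mk cg) f []).foldl
        (fun md c => max md (pvGetDepthA cg c (PySem.Set.add v f))) 0) + 1 := by
  rw [pvGetDepthA, dif_neg (by simpa using h)]
  simp

theorem pvReach_eq (cg : List (String × List String)) (f : String) (w : PySem.Set String) :
    pvReach cg f w =
      ((PySem.Dict.getD (PySem.Dict.mk cg) f []).foldl
        (fun m c =>
          max m (if PySem.Set.contains w c then 0 else pvReach cg c (PySem.Set.add w c))) 0) + 1 := by
  rw [pvReach]
  simp

theorem pvGDA_aux (cg : List (String × List String)) :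
    ∀ (n : Nat) (f : String) (v : PySem.Set String), pvKeysLeft cg v = n →
      pvGetDepthA cg f v =
        if PySem.Set.contains v f then 0 else pvReach cg f (PySem.Set.add v f) := by
  intro n
  induction n using Nat.strong_induction_on with
  | _ n ih =>
    intro f v hn
    by_cases hv : PySem.Set.contains v f = true
    · rw [pvGetDepthA_mem cg f v hv, if_pos hv]
    · have hv' : PySem.Set.contains v f = false := by simpa using hv
      rw [pvGetDepthA_not_mem cg f v hv', if_neg hv, pvReach_eq]
      congr 1
      apply PySem.List.foldl_congr_mem
      intro acc c hc
      have hkey : f ∈ (PySem.Dict.mk cg).keys :=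
        pvGetD_ne_nil_mem_keys cg f (List.ne_nil_of_mem hc)
      have hlt : pvKeysLeft cg (PySem.Set.add v f) < n :=
        hn ▸ pvKeysLeft_lt cg f v hkey hv'
      rw [ih _ hlt c (PySem.Set.add v f) rfl]

theorem pvGDA_eq_reach (cg : List (String × List String)) (f : String) (v : PySem.Set String) :
    pvGetDepthA cg f v =
      if PySem.Set.contains v f then 0 else pvReach cg f (PySem.Set.add v f) :=
  pvGDA_aux cg _ f v rfl

-- foldl max pulls a max out of the accumulator
theorem pvFoldMaxMax (l : List Int) : ∀ a b : Int, l.foldl max (max a b) = max a (l.foldl max b) := by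
  induction l with
  | nil => intro a b; rfl
  | cons x t ih =>
    intro a b
    simp only [List.foldl_cons]
    rw [max_assoc, ih]

theorem pvFoldMax_nonneg (l : List Int) : ∀ a : Int, 0 ≤ a → a ≤ l.foldl max a := by
  induction l with
  | nil => intro a _; simp
  | cons x t ih =>
    intro a ha
    simp only [List.foldl_cons]
    have := ih (max a x) (by omega)
    omega

-- the children fold of pvReach equals the max of pvReach over the pushed frames
theorem pvFoldFilterMap (cg : List (String × List String)) (w : PySem.Set String)
    (l : List String) : ∀ acc : Int, 0 ≤ acc →
    l.foldl (fun m c =>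
        max m (if PySem.Set.contains w c then 0 else pvReach cg c (PySem.Set.add w c))) acc =
      ((l.filterMap (fun c =>
          if PySem.Set.contains w c then none else some (c, PySem.Set.add w c))).map
        (fun x => pvReach cg x.1 x.2)).foldl max acc := by
  induction l with
  | nil => intro acc _; rfl
  | cons c t ih =>
    intro acc hacc
    by_cases hw : PySem.Set.contains w c = true
    · simp only [List.foldl_cons, List.filterMap_cons, if_pos hw]
      rw [show max acc 0 = acc by omega]
      exact ih acc hacc
    · have hw' : PySem.Set.contains w c = false := by simpa using hw
      simp only [List.foldl_cons, List.filterMap_cons, hw', Bool.false_eq_true, if_false,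
        List.map_cons]
      exact ih _ (by omega)

theorem pvReach_val (cg : List (String × List String)) (p : String × PySem.Set String) :
    pvReach cg p.1 p.2 =
      ((pvNext cg p).map (fun x => pvReach cg x.1 x.2)).foldl max 0 + 1 := by
  rw [pvReach_eq, pvFoldFilterMap cg p.2 _ 0 le_rfl]
  rfl

-- max over a flatMap = fold of per-frame maxes
theorem pvFoldFlatMap (cg : List (String × List String))
    (fr : List (String × PySem.Set String)) : ∀ acc : Int, 0 ≤ acc →
    ((fr.flatMap (pvNext cg)).map (fun x => pvReach cg x.1 x.2)).foldl max acc =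
      fr.foldl (fun m p => max m (((pvNext cg p).map (fun x => pvReach cg x.1 x.2)).foldl max 0)) acc := by
  induction fr with
  | nil => intro acc _; rfl
  | cons p t ih =>
    intro acc hacc
    simp only [List.flatMap_cons, List.map_append, List.foldl_append, List.foldl_cons]
    rw [show acc = max acc 0 by omega, pvFoldMaxMax, ih _ (by positivity)]
    have h0 : (0:Int) ≤ ((pvNext cg p).map (fun x => pvReach cg x.1 x.2)).foldl max 0 :=
      pvFoldMax_nonneg _ 0 le_rfl
    congr 1
    omega

-- pull the +1 out of a nonempty max-fold
theorem pvFoldSucc (g : (String × PySem.Set String) → Int)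
    (hg : ∀ p, 0 ≤ g p) (t : List (String × PySem.Set String)) :
    ∀ a : Int, 0 ≤ a →
    t.foldl (fun m p => max m (g p + 1)) (a + 1) = t.foldl (fun m p => max m (g p)) a + 1 := by
  induction t with
  | nil => intro a _; rfl
  | cons p t ih =>
    intro a ha
    simp only [List.foldl_cons]
    rw [show max (a + 1) (g p + 1) = max a (g p) + 1 by omega]
    exact ih _ (by have := hg p; omega)

theorem pvConsSucc (cg : List (String × List String)) (p : String × PySem.Set String)
    (t : List (String × PySem.Set String)) :
    List.foldl (fun m q => max m (pvReach cg q.1 q.2)) 0 (p :: t) =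
      List.foldl (fun m q =>
        max m (((pvNext cg q).map (fun x => pvReach cg x.1 x.2)).foldl max 0)) 0 (p :: t) + 1 := by
  have hMp : ∀ q : String × PySem.Set String,
      (0:Int) ≤ ((pvNext cg q).map (fun x => pvReach cg x.1 x.2)).foldl max 0 :=
    fun q => pvFoldMax_nonneg _ 0 le_rfl
  simp only [List.foldl_cons]
  have h1 : max (0:Int) (pvReach cg p.1 p.2) =
      ((pvNext cg p).map (fun x => pvReach cg x.1 x.2)).foldl max 0 + 1 := by
    have h := pvReach_val cg p
    have h' := hMp p
    omega
  have h2 : max (0:Int) (((pvNext cg p).map (fun x => pvReach cg x.1 x.2)).foldl max 0) =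
      ((pvNext cg p).map (fun x => pvReach cg x.1 x.2)).foldl max 0 := by
    have h := hMp p; omega
  rw [h1, h2]
  have hc : List.foldl (fun m q => max m (pvReach cg q.1 q.2))
        (((pvNext cg p).map (fun x => pvReach cg x.1 x.2)).foldl max 0 + 1) t =
      List.foldl (fun m q =>
          max m (((pvNext cg q).map (fun x => pvReach cg x.1 x.2)).foldl max 0 + 1))
        (((pvNext cg p).map (fun x => pvReach cg x.1 x.2)).foldl max 0 + 1) t := by
    apply PySem.List.foldl_congr_mem
    intro acc q _
    rw [pvReach_val cg q]
  rw [hc]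
  exact pvFoldSucc (fun q => ((pvNext cg q).map (fun x => pvReach cg x.1 x.2)).foldl max 0)
    hMp t _ (hMp p)

theorem pvLevels_eq (cg : List (String × List String))
    (frontier : List (String × PySem.Set String)) (depth : Int) :
    pvLevels cg frontier depth =
      depth + (frontier.map (fun x => pvReach cg x.1 x.2)).foldl max 0 := by
  fun_induction pvLevels cg frontier depth with
  | case1 d => simp
  | case2 fr d h ih =>
    have hat : fr.attach.flatMap (fun x => match x with | ⟨x, _⟩ => pvNext cg x)
        = fr.flatMap (pvNext cg) := by simp
    rw [hat] at ih
    obtain ⟨p, t, rfl⟩ := List.exists_cons_of_ne_nil h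
    rw [ih, pvFoldFlatMap cg _ 0 le_rfl]
    conv_rhs => rw [List.foldl_map]
    rw [pvConsSucc cg p t]
    ring

-- ===== VERDICT (by name: the statement is the Claim_ definition above) =====
theorem calculate_call_depth_spec : Claim_equal_calculate_call_depth := by
  intro cg _
  unfold Spec_calculate_call_depth calculate_call_depth calculate_call_depth_alt
  rw [pvLevels_eq]
  simp only [List.map_map, List.foldl_map, Function.comp_def, zero_add]
  apply PySem.List.foldl_congr_mem
  intro acc f _
  rw [pvGDA_eq_reach]
  rw [if_neg (by simp [PySem.Set.empty] : ¬ PySem.Set.contains (PySem.Set.empty : PySem.Set String) f = true)]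
  rfl
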